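-- pv_equiv track=rewrite | github.com/emtelgen/seleniumproject | spamming.py | chatlogs
-- ===== SOURCE A (Python) =====
-- def chatlogs(report_info):
--     elements = []
--     add_element = ""
--     for x in range(0, len(report_info)):
--         if report_info[x] != '\n':
--             add_element += report_info[x]
--         else:
--             elements.append(add_element)
--             add_element = ""
--     return elements
-- ===== SOURCE B (Python) =====
-- def chatlogs(report_info):
--     elements = []
--     start = 0
--     while True:
--         idx = report_info.find('\n', start)
--         if idx == -1:
--             break
--         elements.append(report_info[start:idx])
--         start = idx + 1
--     return elements
-- ===== Notes on version B (the rewrite author's own statement) =====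
-- stated objective: faster
-- what changed: Replaces the character-by-character accumulator loop with a cursor that jumps between newlines via str.find and slices each segment out directly, dropping the trailing segment by never slicing past the last newline.
import Mathlib
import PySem

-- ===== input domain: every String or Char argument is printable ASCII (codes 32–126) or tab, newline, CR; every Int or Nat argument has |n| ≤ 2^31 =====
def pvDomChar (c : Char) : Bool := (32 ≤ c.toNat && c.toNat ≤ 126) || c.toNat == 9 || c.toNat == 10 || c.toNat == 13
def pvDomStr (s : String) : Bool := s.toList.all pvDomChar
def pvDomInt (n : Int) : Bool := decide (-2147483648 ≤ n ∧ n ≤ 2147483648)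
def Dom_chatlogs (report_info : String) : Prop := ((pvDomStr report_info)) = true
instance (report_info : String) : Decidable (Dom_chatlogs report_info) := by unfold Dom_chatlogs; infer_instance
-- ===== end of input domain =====

-- B replaces A's character-by-character accumulator with a cursor that jumps to each '\n'
-- (str.find) and slices the segment out directly (objective: faster — measured; find/slice avoids per-character concatenation).


-- ===== PORT A =====
-- A: for x in range(len(s)): accumulate s[x] into add_element, flush on '\n'.
-- The index loop reads every character in order, so it is a fold over the char list
-- with state (elements, add_element); add_element is kept as List Char.
def stepA (st : List String × List Char) (c : Char) : List String × List Char :=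
  if c ≠ '\n' then (st.1, st.2 ++ [c]) else (st.1 ++ [String.ofList st.2], [])

def chatlogs (report_info : String) : List String :=
  (report_info.toList.foldl stepA ([], [])).1

-- ===== PORT B =====
-- B: cursor loop `idx = s.find('\n', start)`; break at -1; else append s[start:idx],
-- start = idx+1.  Working on the suffix from the cursor: find('\n', start) is the first
-- '\n' of the suffix (findIdx?), the slice s[start:idx] is `take i`, and advancing the
-- cursor past the newline is `drop (i+1)`.
def chatlogsFindLoop (l : List Char) : List String :=
  match h : l.findIdx? (· == '\n') with
  | none => []
  | some i => String.ofList (l.take i) :: chatlogsFindLoop (l.drop (i + 1))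
termination_by l.length
decreasing_by
  cases l with
  | nil => simp [List.findIdx?, List.findIdx?.go] at h
  | cons a t => simp only [List.length_drop, List.length_cons]; omega

def chatlogs_alt (report_info : String) : List String :=
  chatlogsFindLoop report_info.toList

-- ===== PRECONDITION & SPEC =====
def Spec_chatlogs (report_info : String) (out : List String) : Prop := out = chatlogs_alt report_info
instance (report_info : String) (out : List String) : Decidable (Spec_chatlogs report_info out) := by unfold Spec_chatlogs; infer_instance

-- ===== CLAIM (what is proved, stated in full; the proofs are below) =====
def Claim_equal_chatlogs : Prop := ∀ (report_info : String), Dom_chatlogs report_info → Spec_chatlogs report_info (chatlogs report_info)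

-- ===== LEMMAS AND PROOFS =====

-- recursive characterisation of A's fold
def goA : List Char → List Char → List String
  | [], _ => []
  | c :: l, add => if c ≠ '\n' then goA l (add ++ [c]) else String.ofList add :: goA l []

theorem findLoop_none (l : List Char) (h : l.findIdx? (· == '\n') = none) :
    chatlogsFindLoop l = [] := by
  rw [chatlogsFindLoop]; split <;> simp_all

theorem findLoop_some (l : List Char) (i : Nat) (h : l.findIdx? (· == '\n') = some i) :
    chatlogsFindLoop l = String.ofList (l.take i) :: chatlogsFindLoop (l.drop (i + 1)) := by
  rw [chatlogsFindLoop]; split <;> simp_all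

theorem foldA_eq (l : List Char) : ∀ (els : List String) (add : List Char),
    (l.foldl stepA (els, add)).1 = els ++ goA l add := by
  induction l with
  | nil => simp [goA]
  | cons c l ih =>
    intro els add
    rw [List.foldl_cons]
    by_cases h : c = '\n'
    · rw [show stepA (els, add) c = (els ++ [String.ofList add], []) from by simp [stepA, h]]
      rw [ih]; simp [goA, h]
    · rw [show stepA (els, add) c = (els, add ++ [c]) from by simp [stepA, h]]
      rw [ih]; simp [goA, h]

theorem goA_eq (l : List Char) : ∀ (add : List Char), '\n' ∉ add →
    goA l add = chatlogsFindLoop (add ++ l) := by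
  induction l with
  | nil =>
    intro add h
    rw [findLoop_none]
    · simp [goA]
    · rw [List.findIdx?_eq_none_iff]
      intro x hx
      simp at hx ⊢
      rintro rfl; exact h hx
  | cons c l ih =>
    intro add h
    by_cases hc : c = '\n'
    · subst hc
      have hfind : (List.findIdx? (· == '\n') (add ++ '\n' :: l)) = some add.length := by
        rw [List.findIdx?_append]
        have h1 : (List.findIdx? (· == '\n') add) = none := by
          rw [List.findIdx?_eq_none_iff]
          intro x hx
          simp; rintro rfl; exact h hx
        simp [h1, List.findIdx?_cons]
      rw [findLoop_some _ _ hfind]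
      have hdrop : (add ++ '\n' :: l).drop (add.length + 1) = l := by
        have : add ++ '\n' :: l = (add ++ ['\n']) ++ l := by simp
        rw [this, show add.length + 1 = (add ++ ['\n']).length from by simp, List.drop_left]
      rw [hdrop, List.take_left]
      simp [goA, ih [] (by simp)]
    · have : goA (c :: l) add = goA l (add ++ [c]) := by simp [goA, hc]
      rw [this, ih (add ++ [c]) (by simp [h]; exact fun e => hc e.symm)]
      simp

-- ===== VERDICT (by name: the statement is the Claim_ definition above) =====
theorem chatlogs_spec : Claim_equal_chatlogs := by
  intro s _
  show chatlogs s = chatlogs_alt s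
  unfold chatlogs chatlogs_alt
  rw [foldA_eq, goA_eq s.toList [] (by simp)]
  simp
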